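-- pv_equiv track=rewrite | github.com/JSalazarAlt/coding-problems | Meta/Lv1/03_Kaitenzushi/kaitenzushi.py | get_maximum_eaten_dish_count
-- ===== SOURCE A (Python) =====
-- from typing import List
-- from collections import deque
--
-- def get_maximum_eaten_dish_count(n: int, d: List[int], k: int) -> int:
--     """Solve the "Kaitenzushi" puzzle from Meta Careers.
--
--     There are n dishes in a row on a kaiten belt, with the ith dish being of type d[i].
--     Some dishes may be of the same type as one another. You're very hungry, so you decide
--     to eat along the belt! Initially, your chopsticks are above the first dish (dish 1),
--     and it takes 1 second to move your chopsticks to the next or previous dish.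
--
--     You'll eat a dish if and only if its type is different from the last k dishes you've eaten.
--     Since you haven't eaten any dishes initially, you'll eat the first dish you encounter.
--     After eating a dish, it takes 1 second to return your chopsticks to the position above
--     the next dish on the belt, and you can't eat the same dish twice.
--
--     Approach (Sliding Window with Set and Deque):
--     1. Use a set to track the last k dish types eaten for O(1) lookup.
--     2. Use a deque to maintain the order of the last k dishes eaten.
--     3. For each dish, check if its type is in the set of last k eaten dishes.
--     4. If not in set, eat the dish and update both set and deque.
--     5. If deque exceeds k dishes, remove the oldest dish from both structures.
--
--     Time Complexity: O(n)
--     - Single pass through all dishes with O(1) set and deque operations.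
--
--     Space Complexity: O(k)
--     - Set and deque store at most k dish types.
--
--     Args:
--         n: Number of dishes on the belt.
--         d: List of dish types.
--         k: Number of previously eaten dishes to remember.
--
--     Returns:
--         Maximum number of dishes that can be eaten.
--     """
--     # Set to track the last K dish types eaten for O(1) lookup
--     eaten_dishes_set = set()
--     # Deque to maintain the order of the last K dishes eaten
--     eaten_dishes_dq = deque()
--     # Counter for total dishes eaten
--     total = 0
--     # Iterate through each dish on the kaiten belt
--     for i in range(n):
--         # Check if current dish type is different from last k eaten dishes
--         if d[i] not in eaten_dishes_set:
--             # Eat the dish (increment total count)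
--             total += 1
--             # Add dish type to the end of deque (most recent)
--             eaten_dishes_dq.append(d[i])
--             # Add dish type to set for fast future lookups
--             eaten_dishes_set.add(d[i])
--             # If we've tracked more than k dishes, remove the oldest
--             if len(eaten_dishes_dq) > k:
--                 # Remove the oldest dish type from deque
--                 oldest = eaten_dishes_dq.popleft()
--                 # Remove the oldest dish type from set
--                 eaten_dishes_set.remove(oldest)
--
--     return total
-- ===== SOURCE B (Python) =====
-- def get_maximum_eaten_dish_count(n, d, k):
--     # Last-seen-count dict instead of set+deque: eat d[i] iff it was never
--     # eaten or was last eaten at least k eaten-dishes ago.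
--     last_order = {}
--     total = 0
--     for i in range(n):
--         x = d[i]
--         last = last_order.get(x)
--         if last is None or last <= total - k:
--             total += 1
--             last_order[x] = total
--     return total
-- ===== Notes on version B (the rewrite author's own statement) =====
-- stated objective: idiomatic
-- what changed: Replaces A's set+deque sliding window (with an explicit evict-oldest branch) by a single dict mapping each dish type to the running eaten-count at its last eating; the window test becomes the arithmetic comparison last_order[x] <= total - k and the eviction branch disappears.
import Mathlib
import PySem

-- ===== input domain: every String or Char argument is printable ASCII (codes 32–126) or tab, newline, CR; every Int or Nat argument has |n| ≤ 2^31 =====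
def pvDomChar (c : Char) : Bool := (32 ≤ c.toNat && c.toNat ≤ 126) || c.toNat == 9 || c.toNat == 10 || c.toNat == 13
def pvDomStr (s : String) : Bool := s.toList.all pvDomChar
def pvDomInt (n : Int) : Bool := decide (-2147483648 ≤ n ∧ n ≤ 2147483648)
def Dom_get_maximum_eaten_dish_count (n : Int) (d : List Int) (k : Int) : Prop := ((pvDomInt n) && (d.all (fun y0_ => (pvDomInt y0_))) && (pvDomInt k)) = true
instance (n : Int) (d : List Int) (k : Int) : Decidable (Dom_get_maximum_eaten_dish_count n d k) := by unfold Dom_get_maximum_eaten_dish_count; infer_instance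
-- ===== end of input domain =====

-- B replaces A's set+deque sliding window by a dict of last-eaten counts; same O(n), more idiomatic.


-- ===== PORT A =====
-- loop body of A: state = (eaten_dishes_set, eaten_dishes_dq, total), x = d[i]
def pvStepA (k : Int) (st : PySem.Set Int × List Int × Int) (x : Int) :
    PySem.Set Int × List Int × Int :=
  if PySem.Set.contains st.1 x then st
  else
    let total := st.2.2 + 1
    let dq := st.2.1 ++ [x]                 -- eaten_dishes_dq.append(d[i])
    let s := PySem.Set.add st.1 x           -- eaten_dishes_set.add(d[i])
    if (dq.length : Int) > k then
      -- popleft: dq just got an element appended so it is nonempty and headI/tail are exact;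
      -- set.remove: oldest ∈ s here, so discard is exact (no KeyError is reachable)
      (PySem.Set.discard s dq.headI, dq.tail, total)
    else (s, dq, total)

def get_maximum_eaten_dish_count (n : Int) (d : List Int) (k : Int) : Int :=
  let r := (PySem.List.pyRange 0 n 1).foldl
    (fun st i => pvStepA k st (PySem.List.pyGetD d i 0))   -- d[i]: in range under Pre_
    (PySem.Set.empty, ([], 0))
  r.2.2

-- ===== PORT B =====
-- loop body of B: state = (last_order, total), x = d[i]
def pvStepB (k : Int) (st : PySem.Dict Int Int × Int) (x : Int) :
    PySem.Dict Int Int × Int :=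
  match PySem.Dict.get? st.1 x with        -- last = last_order.get(x)
  | none => (PySem.Dict.insert st.1 x (st.2 + 1), st.2 + 1)
  | some last =>
      if last ≤ st.2 - k then (PySem.Dict.insert st.1 x (st.2 + 1), st.2 + 1) else st

def get_maximum_eaten_dish_count_alt (n : Int) (d : List Int) (k : Int) : Int :=
  let r := (PySem.List.pyRange 0 n 1).foldl
    (fun st i => pvStepB k st (PySem.List.pyGetD d i 0))
    (PySem.Dict.empty, 0)
  r.2

-- ===== PRECONDITION & SPEC =====
-- A indexes d[i] for each i in range(n): n > len(d) raises IndexError, excluded here.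
def Pre_get_maximum_eaten_dish_count (n : Int) (d : List Int) (k : Int) : Prop :=
  n ≤ (d.length : Int)
instance (n : Int) (d : List Int) (k : Int) : Decidable (Pre_get_maximum_eaten_dish_count n d k) := by unfold Pre_get_maximum_eaten_dish_count; infer_instance

def pvWitness_get_maximum_eaten_dish_count : Int × List Int × Int := (5, ([1, 2, 1, 2, 3], 2))

def Spec_get_maximum_eaten_dish_count (n : Int) (d : List Int) (k : Int) (out : Int) : Prop := out = get_maximum_eaten_dish_count_alt n d k
instance (n : Int) (d : List Int) (k : Int) (out : Int) : Decidable (Spec_get_maximum_eaten_dish_count n d k out) := by unfold Spec_get_maximum_eaten_dish_count; infer_instance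

-- ===== CLAIM (what is proved, stated in full; the proofs are below) =====
def Claim_equal_get_maximum_eaten_dish_count : Prop := ∀ (n : Int) (d : List Int) (k : Int), Dom_get_maximum_eaten_dish_count n d k → Pre_get_maximum_eaten_dish_count n d k → Spec_get_maximum_eaten_dish_count n d k (get_maximum_eaten_dish_count n d k)

-- ===== LEMMAS AND PROOFS =====

-- The invariant tying A's (set, deque, total) to B's (last_order, total):
-- the set mirrors the deque; the deque has at most k elements; the deque's
-- elements are exactly the dishes whose last-eaten count lies in (t - |dq|, t],
-- in order; everything off the deque was last eaten at count ≤ t - k.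
def pvInv (k : Int) (s : PySem.Set Int) (dq : List Int) (m : PySem.Dict Int Int) (t : Int) : Prop :=
  (∀ y, y ∈ s ↔ y ∈ dq) ∧
  (dq = [] ∨ (dq.length : Int) ≤ k) ∧
  (∀ j (h : j < dq.length), PySem.Dict.get? m dq[j] = some (t - dq.length + 1 + j)) ∧
  (∀ y v, y ∉ dq → PySem.Dict.get? m y = some v → v ≤ t - k)

lemma pvLoop (k : Int) (l : List Int) :
    ∀ s dq m t, pvInv k s dq m t →
      (l.foldl (pvStepA k) (s, dq, t)).2.2 = (l.foldl (pvStepB k) (m, t)).2 := by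
  induction l with
  | nil => intro s dq m t _; rfl
  | cons x l ih =>
    intro s dq m t hInv
    obtain ⟨h1, h2, h3, h4⟩ := hInv
    have hinj : ∀ i j (hi : i < dq.length) (hj : j < dq.length), dq[i] = dq[j] → i = j := by
      intro i j hi hj he
      have e1 := h3 i hi
      have e2 := h3 j hj
      rw [he, e2] at e1
      have := Option.some.inj e1
      omega
    simp only [List.foldl_cons]
    by_cases hx : x ∈ dq
    · -- x was among the last k eaten: both programs skip
      obtain ⟨j, hj, hdx⟩ := List.getElem_of_mem hx
      have hL : (dq.length : Int) ≤ k := by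
        rcases h2 with h | h
        · exact absurd (h ▸ hx) (List.not_mem_nil)
        · exact h
      have hm : PySem.Dict.get? m x = some (t - dq.length + 1 + j) := hdx ▸ h3 j hj
      have hAeq : pvStepA k (s, dq, t) x = (s, dq, t) := by
        rw [pvStepA, if_pos ((PySem.Set.contains_iff s x).mpr ((h1 x).mpr hx))]
      have hBeq : pvStepB k (m, t) x = (m, t) := by
        simp only [pvStepB, hm]
        rw [if_neg (by omega)]
      rw [hAeq, hBeq]
      exact ih s dq m t ⟨h1, h2, h3, h4⟩
    · -- both programs eat the dish
      have hxns : ¬ PySem.Set.contains s x = true := fun hc =>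
        hx ((h1 x).mp ((PySem.Set.contains_iff s x).mp hc))
      have hBeq : pvStepB k (m, t) x = (PySem.Dict.insert m x (t + 1), t + 1) := by
        cases hget : PySem.Dict.get? m x with
        | none => simp [pvStepB, hget]
        | some v =>
          have hv : v ≤ t - k := h4 x v hx hget
          simp [pvStepB, hget, if_pos hv]
      rw [hBeq]
      have hget' : ∀ y, PySem.Dict.get? (PySem.Dict.insert m x (t + 1)) y
          = if y = x then some (t + 1) else PySem.Dict.get? m y := fun y =>
        PySem.Dict.get?_insert m x y (t + 1)
      by_cases hpop : ((dq ++ [x]).length : Int) > k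
      · -- eviction branch of A fires
        cases dq with
        | nil =>
          have hk0 : k ≤ 0 := by simp at hpop; omega
          have hAeq : pvStepA k (s, [], t) x
              = (PySem.Set.discard (PySem.Set.add s x) x, ([], t + 1)) := by
            rw [pvStepA, if_neg hxns]
            simp only [List.nil_append]
            rw [if_pos (by simpa using hpop)]
            rfl
          rw [hAeq]
          refine ih _ _ _ _ ⟨?_, Or.inl rfl, ?_, ?_⟩
          · intro y
            simp only [PySem.Set.mem_discard, PySem.Set.mem_add, List.not_mem_nil, iff_false]
            rintro ⟨hy | hy, hne⟩
            · exact absurd ((h1 y).mp hy) (List.not_mem_nil)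
            · exact hne hy
          · intro j hj; simp at hj
          · intro y v _ hv
            rw [hget'] at hv
            by_cases hyx : y = x
            · rw [if_pos hyx] at hv
              have := Option.some.inj hv
              omega
            · rw [if_neg hyx] at hv
              have := h4 y v (List.not_mem_nil) hv
              omega
        | cons o rest =>
          have hox : o ≠ x := fun h => hx (h ▸ List.mem_cons_self)
          have honr : o ∉ rest := by
            intro hor
            obtain ⟨j, hj, hje⟩ := List.getElem_of_mem hor
            have : (0 : Nat) = j + 1 :=
              hinj 0 (j + 1) (by simp) (by simp; omega) (by simpa using hje.symm)
            omega
          have hkL : k ≤ ((o :: rest).length : Int) := by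
            simp at hpop ⊢
            omega
          have hAeq : pvStepA k (s, o :: rest, t) x
              = (PySem.Set.discard (PySem.Set.add s x) o, (rest ++ [x], t + 1)) := by
            rw [pvStepA, if_neg hxns]
            rw [if_pos (by simpa using hpop)]
            rfl
          rw [hAeq]
          have hlen : (rest ++ [x]).length = (o :: rest).length := by simp
          refine ih _ _ _ _ ⟨?_, Or.inr ?_, ?_, ?_⟩
          · intro y
            rw [PySem.Set.mem_discard, PySem.Set.mem_add, h1]
            simp only [List.mem_cons, List.mem_append, List.not_mem_nil, or_false]
            constructor
            · rintro ⟨hy, hne⟩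
              rcases hy with (hy | hy) | hy
              · exact absurd hy hne
              · exact Or.inl hy
              · exact Or.inr hy
            · rintro (hy | hy)
              · exact ⟨Or.inl (Or.inr hy), fun hc => honr (hc ▸ hy)⟩
              · exact ⟨Or.inr hy, fun hc => hox (hc.symm.trans hy)⟩
          · rw [hlen]
            rcases h2 with h | h
            · exact absurd h (by simp)
            · exact h
          · intro j hj
            have hj2 : j < rest.length + 1 := by
              simpa using hj
            rw [hget']
            by_cases hjl : j < rest.length
            · rw [List.getElem_append_left hjl]
              have hmem : rest[j] ∈ rest := List.getElem_mem hjl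
              rw [if_neg (fun hcon : rest[j] = x =>
                hx (List.mem_cons.mpr (Or.inr (hcon ▸ hmem))))]
              have h31 := h3 (j + 1) (by simp only [List.length_cons]; omega)
              rw [List.getElem_cons_succ] at h31
              rw [h31]
              congr 1
              simp only [List.length_cons, List.length_append, List.length_nil]
              push_cast
              ring
            · have hj' : j = rest.length := by omega
              rw [List.getElem_concat_length hj' hj, if_pos rfl]
              congr 1
              simp only [List.length_append, List.length_cons, List.length_nil]
              push_cast
              omega
          · intro y v hy hv
            rw [hget'] at hv
            by_cases hyx : y = x
            · exact absurd (by simp [hyx]) hy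
            · rw [if_neg hyx] at hv
              by_cases hydq : y ∈ o :: rest
              · have hyo : y = o := by
                  rcases List.mem_cons.mp hydq with h | h
                  · exact h
                  · exact absurd h (fun hc => hy (by simp [hc]))
                subst hyo
                have h30 := h3 0 (by simp)
                simp only [List.getElem_cons_zero] at h30
                rw [h30] at hv
                have := Option.some.inj hv
                simp only [List.length_cons] at this hkL
                push_cast at this hkL
                omega
              · have := h4 y v hydq hv
                omega
      · -- no eviction: the window is not yet full
        have hAeq : pvStepA k (s, dq, t) x
            = (PySem.Set.add s x, (dq ++ [x], t + 1)) := by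
          rw [pvStepA, if_neg hxns, if_neg hpop]
        rw [hAeq]
        have hkL : ((dq ++ [x]).length : Int) ≤ k := by
          push_cast at hpop ⊢
          omega
        refine ih _ _ _ _ ⟨?_, Or.inr hkL, ?_, ?_⟩
        · intro y
          rw [PySem.Set.mem_add, h1]
          simp
        · intro j hj
          have hj2 : j < dq.length + 1 := by simpa using hj
          rw [hget']
          by_cases hjl : j < dq.length
          · rw [List.getElem_append_left hjl]
            rw [if_neg (fun hcon : dq[j] = x => hx (hcon ▸ List.getElem_mem hjl))]
            rw [h3 j hjl]
            congr 1
            simp only [List.length_append, List.length_cons, List.length_nil]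
            push_cast
            ring
          · have hj' : j = dq.length := by omega
            rw [List.getElem_concat_length hj' hj, if_pos rfl]
            congr 1
            simp only [List.length_append, List.length_cons, List.length_nil]
            push_cast
            omega
        · intro y v hy hv
          rw [hget'] at hv
          by_cases hyx : y = x
          · exact absurd (by simp [hyx]) hy
          · rw [if_neg hyx] at hv
            have := h4 y v (fun hc => hy (by simp [hc])) hv
            omega

lemma pvFoldRange {σ : Type} (f : σ → Int → σ) (d : List Int) (n : Int)
    (hn : n ≤ (d.length : Int)) (init : σ) :
    (PySem.List.pyRange 0 n 1).foldl (fun st i => f st (PySem.List.pyGetD d i 0)) init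
      = (d.take n.toNat).foldl f init := by
  by_cases h0 : n ≤ 0
  · rw [PySem.List.pyRange_one_eq_nil h0, show n.toNat = 0 by omega]
    simp
  · have hxs : (d.take n.toNat).length = n.toNat := by
      rw [List.length_take]; omega
    have hn' : n = ((d.take n.toNat).length : Int) := by rw [hxs]; omega
    conv_lhs => rw [hn']
    rw [PySem.List.foldl_congr_mem _ _
      (fun st i => f st (PySem.List.pyGetD (d.take n.toNat) i 0)) init ?hcg]
    · exact PySem.List.foldl_pyRange_zero_pyGetD' (d.take n.toNat) 0 f init
    · intro acc i hi
      rw [PySem.List.mem_pyRange_one, ← hn'] at hi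
      have hi2 : i < (d.length : Int) := by omega
      show f acc (PySem.List.pyGetD d i 0) = f acc (PySem.List.pyGetD (d.take n.toNat) i 0)
      rw [PySem.List.pyGetD_eq_getElem d 0 hi.1 hi2,
          PySem.List.pyGetD_eq_getElem (d.take n.toNat) 0 hi.1 (by rw [← hn']; exact hi.2),
          List.getElem_take]

-- ===== VERDICT (by name: the statement is the Claim_ definition above) =====
theorem get_maximum_eaten_dish_count_spec : Claim_equal_get_maximum_eaten_dish_count := by
  intro n d k _ hPre
  show _ = _
  unfold get_maximum_eaten_dish_count get_maximum_eaten_dish_count_alt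
  rw [pvFoldRange (pvStepA k) d n hPre, pvFoldRange (pvStepB k) d n hPre]
  exact pvLoop k (d.take n.toNat) PySem.Set.empty [] PySem.Dict.empty 0
    ⟨by simp [PySem.Set.empty], Or.inl rfl, by simp, by simp [PySem.Dict.get?_empty]⟩
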